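-- pv_equiv track=rewrite | github.com/lenarother/advent-of-code | year_2020/day_10.py | get_1_chains_lengths
-- ===== SOURCE A (Python) =====
-- def get_1_chains_lengths(input):
--     """Part 2: Sort list and get lengths of sublists where el[n+1] - el[n] = 1.
--
--     Args:
--         input: list (not sorted).
--
--     Returns:
--         dict: k -> sublist length, v -> num of occurences.
--
--     """
--     data = [0] + sorted(input) + [max(input) + 3]
--     result = {}
--     data_len = len(data)
--     counter = 0
--     for count, val in enumerate(data):
--         if count < data_len - 1:
--             num = data[count + 1] - val
--             if num == 1:
--                 counter += 1
--             elif num == 3: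
--                 result.setdefault(counter, 0)
--                 result[counter] += 1
--                 counter = 0
--     return result
-- ===== SOURCE B (Python) =====
-- def get_1_chains_lengths(input):
--     """Same result as A: built from the diff list by slicing at the 3-gaps
--     instead of a running counter that resets."""
--     data = [0] + sorted(input) + [max(input) + 3]
--     diffs = [data[i + 1] - data[i] for i in range(len(data) - 1)]
--     result = {}
--     prev = 0
--     for i, d in enumerate(diffs):
--         if d == 3:
--             k = diffs[prev:i].count(1)
--             result[k] = result.get(k, 0) + 1
--             prev = i + 1
--     return result
-- ===== Notes on version B (the rewrite author's own statement) =====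
-- stated objective: alternative
-- what changed: Replaces A's single enumerate pass with a running counter that resets at each 3-gap by a pipeline: build the consecutive-difference list once, then at each 3-gap count the 1s in the slice of differences since the previous 3-gap.
import Mathlib
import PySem

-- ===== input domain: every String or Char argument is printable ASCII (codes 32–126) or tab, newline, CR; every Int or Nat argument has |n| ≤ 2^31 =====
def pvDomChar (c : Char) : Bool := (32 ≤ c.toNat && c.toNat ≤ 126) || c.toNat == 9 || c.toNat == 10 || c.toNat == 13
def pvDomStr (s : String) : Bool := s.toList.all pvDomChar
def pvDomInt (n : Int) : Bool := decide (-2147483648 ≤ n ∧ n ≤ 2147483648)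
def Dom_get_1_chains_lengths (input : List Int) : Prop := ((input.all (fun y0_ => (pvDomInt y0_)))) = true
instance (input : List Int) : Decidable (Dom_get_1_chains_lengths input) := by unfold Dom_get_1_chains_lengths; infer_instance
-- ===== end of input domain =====

-- B re-implements A as a diff-list pipeline (slice-and-count at each 3-gap) instead of a
-- running resetting counter; same complexity, alternative decomposition.

-- ===== PORT A =====
-- literal transliteration of A; max(input) raises ValueError on [] → none branch excluded by Pre_
def get_1_chains_lengths (input : List Int) : List (Int × Int) :=
  match PySem.List.max? input (fun x => x) with
  | none => []   -- unreachable under Pre_ (Python raises ValueError here)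
  | some m =>
    let data : List Int := [0] ++ PySem.List.sorted input (fun x => x) false ++ [m + 3]
    let data_len : Int := data.length
    let st := (PySem.List.enumerate data 0).foldl
      (fun (st : PySem.Dict Int Int × Int) p =>
        let result := st.1
        let counter := st.2
        let count := p.1
        let val := p.2
        if count < data_len - 1 then
          -- data[count+1]: index always in range when count < data_len - 1, default never used
          let num := PySem.List.pyGetD data (count + 1) 0 - val
          if num = 1 then (result, counter + 1)
          else if num = 3 then ((result.setdefault counter 0).modify counter 0 (· + 1), 0)
          else (result, counter)
        else (result, counter))
      (PySem.Dict.empty, 0)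
    st.1.items

-- ===== PORT B =====
-- literal transliteration of Source B
def get_1_chains_lengths_alt (input : List Int) : List (Int × Int) :=
  match PySem.List.max? input (fun x => x) with
  | none => []   -- unreachable under Pre_ (Python raises ValueError here)
  | some m =>
    let data : List Int := [0] ++ PySem.List.sorted input (fun x => x) false ++ [m + 3]
    let diffs : List Int := (PySem.List.pyRange 0 ((data.length : Int) - 1) 1).map
      (fun i => PySem.List.pyGetD data (i + 1) 0 - PySem.List.pyGetD data i 0)
    let st := (PySem.List.enumerate diffs 0).foldl
      (fun (st : PySem.Dict Int Int × Int) p =>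
        let result := st.1
        let prev := st.2
        let i := p.1
        let d := p.2
        if d = 3 then
          let k : Int := PySem.List.count (PySem.List.slice diffs (some prev) (some i)) 1
          (result.insert k (result.getD k 0 + 1), i + 1)
        else (result, prev))
      (PySem.Dict.empty, 0)
    st.1.items

-- ===== PRECONDITION & SPEC =====
-- Pre_ excludes exactly the empty list, on which A's max(input) raises ValueError.
def Pre_get_1_chains_lengths (input : List Int) : Prop := input ≠ []
instance (input : List Int) : Decidable (Pre_get_1_chains_lengths input) := by
  unfold Pre_get_1_chains_lengths; infer_instance
def pvWitness_get_1_chains_lengths : List Int := [1, 2, 5]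

def Spec_get_1_chains_lengths (input : List Int) (out : List (Int × Int)) : Prop := out = get_1_chains_lengths_alt input
instance (input : List Int) (out : List (Int × Int)) : Decidable (Spec_get_1_chains_lengths input out) := by unfold Spec_get_1_chains_lengths; infer_instance

-- ===== CLAIM (what is proved, stated in full; the proofs are below) =====
def Claim_equal_get_1_chains_lengths : Prop := ∀ (input : List Int), Dom_get_1_chains_lengths input → Pre_get_1_chains_lengths input → Spec_get_1_chains_lengths input (get_1_chains_lengths input)

-- ===== LEMMAS AND PROOFS =====

theorem incr_dict_eq (d : PySem.Dict Int Int) (k : Int) :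
    (d.setdefault k 0).modify k 0 (· + 1) = d.insert k (d.getD k 0 + 1) := by
  by_cases hc : d.contains k = true
  · rw [PySem.Dict.setdefault_of_contains d 0 hc]; rfl
  · rw [PySem.Dict.setdefault_of_not_contains d 0 (by simpa using hc)]
    rw [show ∀ (e : PySem.Dict Int Int) j, e.modify j 0 (· + 1) = e.insert j (e.getD j 0 + 1) from fun _ _ => rfl]
    rw [PySem.Dict.getD_insert_self, PySem.Dict.insert_insert_self,
        PySem.Dict.getD_of_not_contains d 0 (by simpa using hc)]

theorem getElem?_of_drop_cons {ds t : List Int} {x : Int} {j : Nat}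
    (hdrop : ds.drop j = x :: t) : ds[j]? = some x := by
  have h : (List.drop j ds)[0]? = ds[j + 0]? := List.getElem?_drop
  rw [hdrop] at h
  simpa using h.symm

theorem count_slice_succ (ds t : List Int) (x : Int) (p j : Nat) (hpj : p ≤ j)
    (hdrop : ds.drop j = x :: t) :
    PySem.List.count (PySem.List.slice ds (some ((p : Int))) (some ((j : Int) + 1))) 1
      = PySem.List.count (PySem.List.slice ds (some ((p : Int))) (some ((j : Int)))) 1
        + (if x = 1 then 1 else 0) := by
  have hj : (j : Int) + 1 = ((j + 1 : Nat) : Int) := by push_cast; ring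
  rw [hj, PySem.List.slice_natCast, PySem.List.slice_natCast,
      PySem.List.count_eq, PySem.List.count_eq]
  have h1 : j + 1 - p = (j - p) + 1 := by omega
  have hget : (List.drop p ds)[j - p]? = some x := by
    rw [List.getElem?_drop]
    have h2 : p + (j - p) = j := by omega
    rw [h2, getElem?_of_drop_cons hdrop]
  rw [h1, List.take_add_one, hget]
  simp [List.count_append, List.count_singleton]

theorem main_loop (ds : List Int) (s : List Int) : ∀ (j p : Nat), p ≤ j → ds.drop j = s →
    ∀ (r : PySem.Dict Int Int),
    (s.foldl
      (fun (st : PySem.Dict Int Int × Int) num =>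
        if num = 1 then (st.1, st.2 + 1)
        else if num = 3 then ((st.1.setdefault st.2 0).modify st.2 0 (· + 1), 0)
        else (st.1, st.2))
      (r, (PySem.List.count (PySem.List.slice ds (some ((p : Nat) : Int)) (some ((j : Nat) : Int))) 1 : Int))).1
    =
    ((PySem.List.enumerate s (j : Int)).foldl
      (fun (st : PySem.Dict Int Int × Int) q =>
        if q.2 = 3 then
          ((st.1.insert (PySem.List.count (PySem.List.slice ds (some st.2) (some q.1)) 1 : Int)
              (st.1.getD (PySem.List.count (PySem.List.slice ds (some st.2) (some q.1)) 1 : Int) 0 + 1)), q.1 + 1)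
        else (st.1, st.2))
      (r, ((p : Nat) : Int))).1 := by
  induction s with
  | nil => intro j p hpj hdrop r; simp [PySem.List.enumerate_nil]
  | cons x t ih =>
    intro j p hpj hdrop r
    have hdrop' : ds.drop (j + 1) = t := by
      have : List.drop 1 (List.drop j ds) = List.drop (j + 1) ds := by
        rw [List.drop_drop]
      rw [← this, hdrop]; simp
    have hcast : (j : Int) + 1 = ((j + 1 : Nat) : Int) := by push_cast; ring
    rw [PySem.List.enumerate_cons, List.foldl_cons, List.foldl_cons]
    by_cases h1 : x = 1
    · subst h1
      simp only [show (1 : Int) ≠ 3 by decide, reduceIte]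
      have hc := count_slice_succ ds t 1 p j hpj hdrop
      rw [if_pos rfl] at hc
      have : (PySem.List.count (PySem.List.slice ds (some ((p : Nat) : Int)) (some ((j : Nat) : Int))) 1 : Int) + 1
           = (PySem.List.count (PySem.List.slice ds (some ((p : Nat) : Int)) (some (((j + 1 : Nat) : Nat) : Int))) 1 : Int) := by
        rw [← hcast]; rw [hc]; push_cast; ring
      rw [this, hcast]
      exact ih (j + 1) p (by omega) hdrop' r
    · by_cases h3 : x = 3
      · subst h3
        simp only [show (3 : Int) ≠ 1 by decide, reduceIte]
        rw [hcast]
        have hz : (PySem.List.count (PySem.List.slice ds (some (((j + 1 : Nat)) : Int)) (some (((j + 1 : Nat)) : Int))) 1 : Int) = 0 := by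
          rw [PySem.List.slice_natCast]; simp
        have := ih (j + 1) (j + 1) (le_refl _) hdrop'
          ((r.setdefault (PySem.List.count (PySem.List.slice ds (some ((p : Nat) : Int)) (some ((j : Nat) : Int))) 1 : Int) 0).modify
            (PySem.List.count (PySem.List.slice ds (some ((p : Nat) : Int)) (some ((j : Nat) : Int))) 1 : Int) 0 (· + 1))
        rw [hz] at this
        rw [this]
        rw [incr_dict_eq]
      · simp only [if_neg h1, if_neg h3]
        have hc := count_slice_succ ds t x p j hpj hdrop
        rw [if_neg h1, add_zero] at hc
        have : (PySem.List.count (PySem.List.slice ds (some ((p : Nat) : Int)) (some ((j : Nat) : Int))) 1 : Int)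
             = (PySem.List.count (PySem.List.slice ds (some ((p : Nat) : Int)) (some (((j + 1 : Nat)) : Int))) 1 : Int) := by
          rw [← hcast, hc]
        rw [this, hcast]
        exact ih (j + 1) p (by omega) hdrop' r

-- specialization of main_loop to the initial state
theorem main_loop0 (ds : List Int) :
    (ds.foldl
      (fun (st : PySem.Dict Int Int × Int) num =>
        if num = 1 then (st.1, st.2 + 1)
        else if num = 3 then ((st.1.setdefault st.2 0).modify st.2 0 (· + 1), 0)
        else (st.1, st.2))
      (PySem.Dict.empty, 0)).1
    =
    ((PySem.List.enumerate ds 0).foldl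
      (fun (st : PySem.Dict Int Int × Int) q =>
        if q.2 = 3 then
          ((st.1.insert (PySem.List.count (PySem.List.slice ds (some st.2) (some q.1)) 1 : Int)
              (st.1.getD (PySem.List.count (PySem.List.slice ds (some st.2) (some q.1)) 1 : Int) 0 + 1)), q.1 + 1)
        else (st.1, st.2))
      (PySem.Dict.empty, 0)).1 := by
  have h := main_loop ds ds 0 0 (le_refl 0) (by simp) PySem.Dict.empty
  have hz : (PySem.List.count (PySem.List.slice ds (some ((0 : Nat) : Int)) (some ((0 : Nat) : Int))) 1 : Int) = 0 := by
    rw [PySem.List.slice_natCast]; simp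
  rw [hz] at h
  simpa using h


theorem A_to_diffs (data : List Int) (h1 : 1 ≤ data.length) :
    ((PySem.List.enumerate data 0).foldl
      (fun (st : PySem.Dict Int Int × Int) p =>
        if p.1 < (data.length : Int) - 1 then
          (if PySem.List.pyGetD data (p.1 + 1) 0 - p.2 = 1 then (st.1, st.2 + 1)
           else if PySem.List.pyGetD data (p.1 + 1) 0 - p.2 = 3 then
             ((st.1.setdefault st.2 0).modify st.2 0 (· + 1), 0)
           else (st.1, st.2))
        else (st.1, st.2))
      (PySem.Dict.empty, 0))
    = (((PySem.List.pyRange 0 ((data.length : Int) - 1)).map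
          (fun i => PySem.List.pyGetD data (i + 1) 0 - PySem.List.pyGetD data i 0)).foldl
        (fun (st : PySem.Dict Int Int × Int) num =>
          if num = 1 then (st.1, st.2 + 1)
          else if num = 3 then ((st.1.setdefault st.2 0).modify st.2 0 (· + 1), 0)
          else (st.1, st.2))
        (PySem.Dict.empty, 0)) := by
  rw [PySem.List.enumerate_eq_map_pyRange data 0, List.foldl_map]
  simp only [PySem.List.len_eq]
  rw [PySem.List.pyRange_one_append 0 ((data.length : Int) - 1) (data.length : Int)
        (by omega) (by omega), List.foldl_append]
  have hlast : PySem.List.pyRange ((data.length : Int) - 1) (data.length : Int)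
      = [(data.length : Int) - 1] := by
    have h := PySem.List.pyRange_one_singleton ((data.length : Int) - 1)
    rw [show (data.length : Int) - 1 + 1 = (data.length : Int) by ring] at h
    exact h
  rw [hlast]
  simp only [List.foldl_cons, List.foldl_nil]
  rw [if_neg (lt_irrefl _)]
  rw [List.foldl_map]
  exact PySem.List.foldl_congr_mem _ _ _ _
    (fun acc x hx => by
      have hlt := (PySem.List.mem_pyRange_one.mp hx).2
      simp only [if_pos hlt])

-- ===== VERDICT (by name: the statement is the Claim_ definition above) =====
theorem get_1_chains_lengths_spec : Claim_equal_get_1_chains_lengths := by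
  intro input hdom hpre
  unfold Spec_get_1_chains_lengths get_1_chains_lengths get_1_chains_lengths_alt
  cases hmax : PySem.List.max? input (fun x => x) with
  | none => exact absurd ((PySem.List.max?_eq_none_iff input _).mp hmax) hpre
  | some m =>
    dsimp only
    rw [A_to_diffs ([0] ++ PySem.List.sorted input (fun x => x) false ++ [m + 3]) (by simp)]
    exact congrArg PySem.Dict.items (main_loop0 _)
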